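-- pv_equiv track=rewrite | github.com/SEDO11/Self_Phython | 이코테/복습/3주차_그리디/1이될떄까지.py | fn
-- ===== SOURCE A (Python) =====
-- def fn(n, k):
--     cnt = 0
--     while n>1:
--         if n%k == 0:
--             n //= k
--         else:
--             n-=1
--         cnt += 1
--     return cnt
-- ===== SOURCE B (Python) =====
-- def fn(n, k):
--     # Recursive, batched version: one call per division, all the
--     # intermediate single-step subtractions collapsed into one addition.
--     if n <= 1:
--         return 0
--     r = n % abs(k)  # subtract-steps needed before n is divisible by k
--     if r == 0:
--         return 1 + fn(n // k, k)
--     if n - r < 1:   # n reaches 1 before becoming divisible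
--         return n - 1
--     return r + fn(n - r, k)
-- ===== Notes on version B (the rewrite author's own statement) =====
-- stated objective: faster
-- what changed: B replaces A's iterative one-by-one decrement loop with a direct recursion that batches all n % abs(k) subtractions into a single arithmetic step per division, so it makes O(log_k n) recursive calls instead of A's up to O(k*log_k n) loop iterations.
import Mathlib
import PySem

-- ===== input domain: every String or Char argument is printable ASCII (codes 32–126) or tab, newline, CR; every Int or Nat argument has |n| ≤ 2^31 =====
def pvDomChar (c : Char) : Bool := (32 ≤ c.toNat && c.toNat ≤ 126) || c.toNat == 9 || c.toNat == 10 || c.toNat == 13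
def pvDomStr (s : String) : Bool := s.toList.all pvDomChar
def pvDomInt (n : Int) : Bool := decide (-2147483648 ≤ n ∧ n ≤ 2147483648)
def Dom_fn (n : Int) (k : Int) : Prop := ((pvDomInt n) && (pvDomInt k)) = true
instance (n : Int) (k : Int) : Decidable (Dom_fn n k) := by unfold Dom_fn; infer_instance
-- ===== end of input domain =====

-- B is a direct recursion that batches the n % abs(k) single-step subtractions into one
-- arithmetic step per division, replacing A's one-by-one decrement loop; equivalence on Pre_fn.
-- Both ports carry a fuel of n.toNat purely to make the recursion total in Lean; inside
-- Pre_fn it never runs out (the argument's toNat strictly decreases each step).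

-- ===== PORT A =====
-- literal port of A's while-loop (n, cnt are the mutable loop state)
def fnLoopA : Nat → Int → Int → Int → Int
  | 0, _, _, cnt => cnt
  | fuel + 1, n, k, cnt =>
    if 1 < n then
      if PySem.Int.mod n k = 0 then
        fnLoopA fuel (PySem.Int.floordiv n k) k (cnt + 1)
      else
        fnLoopA fuel (n - 1) k (cnt + 1)
    else cnt

def fn (n : Int) (k : Int) : Int := fnLoopA n.toNat n k 0

-- ===== PORT B =====
-- literal port of Source B's recursion (r := n % abs(k) is PySem.Int.mod n |k|)
def fnRecB : Nat → Int → Int → Int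
  | 0, _, _ => 0
  | fuel + 1, n, k =>
    if n ≤ 1 then 0
    else
      let r := PySem.Int.mod n |k|
      if r = 0 then 1 + fnRecB fuel (PySem.Int.floordiv n k) k
      else if n - r < 1 then n - 1
      else r + fnRecB fuel (n - r) k

def fn_alt (n : Int) (k : Int) : Int := fnRecB n.toNat n k

-- ===== PRECONDITION & SPEC =====
-- Pre_fn excludes exactly the inputs where Python A does not return:
-- k = 0 with n > 1 (ZeroDivisionError) and k = 1 with n > 1 (infinite loop).
def Pre_fn (n : Int) (k : Int) : Prop := n ≤ 1 ∨ (k ≠ 0 ∧ k ≠ 1)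
instance (n : Int) (k : Int) : Decidable (Pre_fn n k) := by unfold Pre_fn; infer_instance
def pvWitness_fn : Int × Int := (26, 3)

def Spec_fn (n : Int) (k : Int) (out : Int) : Prop := out = fn_alt n k
instance (n : Int) (k : Int) (out : Int) : Decidable (Spec_fn n k out) := by unfold Spec_fn; infer_instance

-- ===== CLAIM (what is proved, stated in full; the proofs are below) =====
def Claim_equal_fn : Prop := ∀ (n : Int) (k : Int), Dom_fn n k → Pre_fn n k → Spec_fn n k (fn n k)

-- ===== LEMMAS AND PROOFS =====

-- one loop iteration strictly shrinks n.toNat in the division branch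
theorem pvFloordivToNatLt (n k : Int) (hn : 1 < n) (hk0 : k ≠ 0) (hk1 : k ≠ 1) :
    (PySem.Int.floordiv n k).toNat < n.toNat := by
  have key := PySem.Int.floordiv_mul_add_mod n k
  rcases lt_or_gt_of_ne hk0 with hneg | hpos
  · have hm := PySem.Int.mod_neg_bounds (a := n) hneg
    have hf : PySem.Int.floordiv n k < 0 := by nlinarith [hm.2]
    omega
  · have hk2 : 2 ≤ k := by omega
    have hm0 : 0 ≤ PySem.Int.mod n k := PySem.Int.mod_nonneg (a := n) hpos
    have hmk : PySem.Int.mod n k < k := PySem.Int.mod_lt (a := n) hpos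
    have hf0 : 0 ≤ PySem.Int.floordiv n k := by nlinarith
    have hfn : PySem.Int.floordiv n k < n := by nlinarith
    omega

-- mod n k = 0 iff mod n |k| = 0 (both mean k divides n)
theorem pvModAbsZero (n k : Int) : PySem.Int.mod n k = 0 ↔ PySem.Int.mod n |k| = 0 := by
  rw [PySem.Int.mod_eq_zero_iff_dvd, PySem.Int.mod_eq_zero_iff_dvd, abs_dvd]

-- once n ≤ 1 A's loop returns cnt whatever the fuel
theorem pvLoopABase (f : Nat) (n k cnt : Int) (hn : ¬ 1 < n) : fnLoopA f n k cnt = cnt := by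
  cases f with
  | zero => rfl
  | succ f => rw [fnLoopA, if_neg hn]

-- a run of j consecutive subtract steps of A, valid while no intermediate value is divisible
theorem pvSubRun (k : Int) (j : Nat) :
    ∀ (fuel : Nat) (n cnt : Int), j ≤ fuel → 1 ≤ n - (j : Int) →
      (∀ m : Int, n - (j : Int) < m → m ≤ n → PySem.Int.mod m k ≠ 0) →
      fnLoopA fuel n k cnt = fnLoopA (fuel - j) (n - (j : Int)) k (cnt + (j : Int)) := by
  induction j with
  | zero => intro fuel n cnt _ _ _; simp
  | succ j ih =>
    intro fuel n cnt hjf hge hnd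
    obtain ⟨g, rfl⟩ : ∃ g, fuel = g + 1 := ⟨fuel - 1, by omega⟩
    have hn : 1 < n := by omega
    have hm : PySem.Int.mod n k ≠ 0 := hnd n (by omega) le_rfl
    rw [fnLoopA, if_pos hn, if_neg hm]
    have := ih g (n - 1) (cnt + 1) (by omega) (by omega)
      (fun m h1 h2 => hnd m (by omega) (by omega))
    rw [this]
    congr 1 <;> omega

-- A's fuel does not matter as long as it is at least n.toNat
theorem pvAExt (k : Int) (hk0 : k ≠ 0) (hk1 : k ≠ 1) :
    ∀ (f f' : Nat) (n cnt : Int), n.toNat ≤ f → n.toNat ≤ f' →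
      fnLoopA f n k cnt = fnLoopA f' n k cnt := by
  intro f
  induction f with
  | zero =>
    intro f' n cnt hb _
    have hn : ¬ 1 < n := by omega
    rw [pvLoopABase 0 n k cnt hn, pvLoopABase f' n k cnt hn]
  | succ f ihf =>
    intro f' n cnt hb hb'
    by_cases hn : 1 < n
    · obtain ⟨g, rfl⟩ : ∃ g, f' = g + 1 := ⟨f' - 1, by omega⟩
      rw [fnLoopA, fnLoopA, if_pos hn, if_pos hn]
      by_cases hm : PySem.Int.mod n k = 0
      · rw [if_pos hm, if_pos hm]
        have hlt := pvFloordivToNatLt n k hn hk0 hk1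
        exact ihf g _ _ (by omega) (by omega)
      · rw [if_neg hm, if_neg hm]
        exact ihf g _ _ (by omega) (by omega)
    · rw [pvLoopABase _ n k cnt hn, pvLoopABase _ n k cnt hn]

-- the main equivalence: A's accumulator loop equals cnt plus B's recursion
theorem pvLoopEq (k : Int) (hk0 : k ≠ 0) (hk1 : k ≠ 1) :
    ∀ (fuel : Nat) (n cnt : Int), n.toNat ≤ fuel → fnLoopA fuel n k cnt = cnt + fnRecB fuel n k := by
  intro fuel
  induction fuel with
  | zero =>
    intro n cnt hb
    have hn : ¬ 1 < n := by omega
    rw [pvLoopABase 0 n k cnt hn]; simp [fnRecB]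
  | succ fuel ih =>
    intro n cnt hb
    by_cases hn : 1 < n
    · have hn' : ¬ n ≤ 1 := by omega
      by_cases hm : PySem.Int.mod n k = 0
      · have hmb : PySem.Int.mod n |k| = 0 := (pvModAbsZero n k).mp hm
        rw [fnLoopA, if_pos hn, if_pos hm, fnRecB]
        simp only [hn', if_false, hmb, if_true, eq_self_iff_true]
        have hlt := pvFloordivToNatLt n k hn hk0 hk1
        rw [ih _ (cnt + 1) (by omega)]
        ring
      · have habs : (0:Int) < |k| := abs_pos.mpr hk0
        have hmb : PySem.Int.mod n |k| ≠ 0 := fun h0 => hm ((pvModAbsZero n k).mpr h0)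
        set d := PySem.Int.mod n |k| with hd
        have hd0 : 0 ≤ d := PySem.Int.mod_nonneg (a := n) habs
        have hdk : d < |k| := PySem.Int.mod_lt (a := n) habs
        have hkey := PySem.Int.floordiv_mul_add_mod n |k|
        have hdvd : |k| ∣ (n - d) := ⟨PySem.Int.floordiv n |k|, by linarith⟩
        -- any m strictly between n - d and n is not divisible by k
        have hnd : ∀ m : Int, n - d < m → m ≤ n → PySem.Int.mod m k ≠ 0 := by
          intro m h1 h2 hmz
          have : |k| ∣ (m - (n - d)) :=
            Int.dvd_sub ((abs_dvd k m).mpr ((PySem.Int.mod_eq_zero_iff_dvd m k).mp hmz)) hdvd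
          have := Int.le_of_dvd (by omega) this
          omega
        rw [fnRecB]
        simp only [hn', if_false, ← hd, if_neg hmb]
        by_cases ht : n - d < 1
        · -- n - d ≤ 0: A subtracts n - 1 times down to 1; B returns n - 1 directly
          rw [if_pos ht]
          have hrun := pvSubRun k (n - 1).toNat (fuel + 1) n cnt (by omega) (by omega)
            (fun m h1 h2 => hnd m (by omega) h2)
          have h1 : n - (((n - 1).toNat : Nat) : Int) = 1 := by omega
          rw [h1] at hrun
          rw [hrun, pvLoopABase _ 1 k _ (by omega)]
          omega
        · -- otherwise A performs d subtract steps, then both continue at n - d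
          rw [if_neg ht]
          have hrun := pvSubRun k d.toNat (fuel + 1) n cnt (by omega) (by omega)
            (fun m h1 h2 => hnd m (by omega) h2)
          have hcast : ((d.toNat : Nat) : Int) = d := by omega
          rw [hcast] at hrun
          rw [hrun, pvAExt k hk0 hk1 (fuel + 1 - d.toNat) fuel (n - d) (cnt + d)
            (by omega) (by omega)]
          rw [ih _ (cnt + d) (by omega)]
          ring
    · rw [pvLoopABase _ n k cnt hn, fnRecB]
      have hn' : n ≤ 1 := by omega
      simp [hn']

-- ===== VERDICT (by name: the statement is the Claim_ definition above) =====
theorem fn_spec : Claim_equal_fn := by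
  intro n k _ hpre
  unfold Spec_fn fn fn_alt
  rcases hpre with hn | ⟨hk0, hk1⟩
  · rw [pvLoopABase _ n k 0 (by omega)]
    cases h : n.toNat with
    | zero => rfl
    | succ f => rw [fnRecB]; simp [show n ≤ 1 from hn]
  · rw [pvLoopEq k hk0 hk1 n.toNat n 0 le_rfl]
    ring
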